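-- pv_equiv track=rewrite | github.com/lmcmz/NUZE | Server/create_sql.py | varchar_length
-- ===== SOURCE A (Python) =====
-- def varchar_length(num):
--     length = len(str(num))
--     if length == 1:
--         length = 10
--     else:
--         zeros = ''
--         for i in range(length - 1):
--             zeros += '0'
--         begin = int(str(num)[0]) + 1
--         length = str(begin) + zeros
--         length = int(length)
--     return length
-- ===== SOURCE B (Python) =====
-- def varchar_length(num):
--     s = str(num)
--     if len(s) == 1:
--         return 10
--     return (int(s[0]) + 1) * 10 ** (len(s) - 1)
-- ===== Notes on version B (the rewrite author's own statement) =====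
-- stated objective: simpler
-- what changed: Replaces the character-by-character zeros-string accumulation loop and the str+int round-trip with a single closed-form arithmetic expression (int(s[0])+1)*10**(len(s)-1).
import Mathlib
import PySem

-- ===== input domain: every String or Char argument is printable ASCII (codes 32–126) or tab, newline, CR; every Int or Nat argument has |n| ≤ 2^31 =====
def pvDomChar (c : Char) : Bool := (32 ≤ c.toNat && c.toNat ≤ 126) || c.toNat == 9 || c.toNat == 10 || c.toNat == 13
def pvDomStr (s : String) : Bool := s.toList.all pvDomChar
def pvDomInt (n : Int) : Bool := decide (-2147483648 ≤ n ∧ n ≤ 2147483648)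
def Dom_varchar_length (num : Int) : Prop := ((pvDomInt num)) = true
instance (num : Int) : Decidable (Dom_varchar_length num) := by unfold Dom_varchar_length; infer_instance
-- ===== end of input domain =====

-- B replaces A's zeros-string accumulation loop and str+int round-trip with the
-- closed-form expression (int(s[0])+1)*10**(len(s)-1): simpler, same values.


-- ===== PORT A =====
-- int(str(num)[0]): fetch char 0, parse the one-char string; `.getD 0` only
-- totalizes the two spots where Python would raise (excluded by Pre_).
def varchar_length (num : Int) : Int :=
  let length : Int := ((PySem.Int.toChars num).length : Int)
  if length = 1 then 10
  else
    let zeros : List Char :=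
      (PySem.List.pyRange 0 (length - 1) 1).foldl (fun acc _ => acc ++ ['0']) []
    let begin_ : Int :=
      ((PySem.List.pyGet? (PySem.Int.toChars num) 0).bind
        (fun c => PySem.Int.ofChars? [c])).getD 0 + 1
    (PySem.Int.ofChars? (PySem.Int.toChars begin_ ++ zeros)).getD 0

-- ===== PORT B =====
def varchar_length_alt (num : Int) : Int :=
  let s := PySem.Int.toChars num
  if s.length = 1 then 10
  else
    (((PySem.List.pyGet? s 0).bind (fun c => PySem.Int.ofChars? [c])).getD 0 + 1)
      * 10 ^ (s.length - 1)

-- ===== PRECONDITION & SPEC =====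
-- Pre_ excludes negative inputs: there str(num) starts with '-', so int(str(num)[0])
-- raises ValueError in Python A (and in B alike).
def Pre_varchar_length (num : Int) : Prop := 0 ≤ num
instance (num : Int) : Decidable (Pre_varchar_length num) := by
  unfold Pre_varchar_length; infer_instance

def pvWitness_varchar_length : Int := 437

def Spec_varchar_length (num : Int) (out : Int) : Prop := out = varchar_length_alt num
instance (num : Int) (out : Int) : Decidable (Spec_varchar_length num out) := by
  unfold Spec_varchar_length; infer_instance

-- ===== CLAIM (what is proved, stated in full; the proofs are below) =====
def Claim_equal_varchar_length : Prop :=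
  ∀ (num : Int), Dom_varchar_length num → Pre_varchar_length num →
    Spec_varchar_length num (varchar_length num)

-- ===== LEMMAS AND PROOFS =====

-- the closed-form check on the (leading digit, zero count) pair: 81 finite cases
lemma final_parse (D k : Nat) (hD1 : 1 ≤ D) (hD9 : D < 10) (hk1 : 1 ≤ k) (hk9 : k ≤ 9) :
    (PySem.Int.ofChars? (PySem.Int.toChars ((PySem.Int.ofChars? [D.digitChar]).getD 0 + 1)
        ++ List.foldl (fun acc _ => acc ++ ['0']) [] (PySem.List.pyRange 0 (k : Int) 1))).getD 0
      = ((PySem.Int.ofChars? [D.digitChar]).getD 0 + 1) * 10 ^ (k + 1 - 1) := by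
  interval_cases D <;> interval_cases k <;> decide

-- `Nat.toDigitsCore` with enough fuel produces exactly the decimal digits (reversed).
lemma toDigitsCore_eq_digits (f : Nat) : ∀ (n : Nat) (acc : List Char), 0 < n → n < f →
    Nat.toDigitsCore 10 f n acc = ((Nat.digits 10 n).map Nat.digitChar).reverse ++ acc := by
  induction f with
  | zero => intro n acc h1 h2; omega
  | succ f ih =>
    intro n acc h1 h2
    rw [Nat.digits_def' (by norm_num : 1 < 10) h1]
    simp only [Nat.toDigitsCore, List.map_cons, List.reverse_cons, List.append_assoc,
      List.singleton_append]
    by_cases h : n / 10 = 0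
    · simp [h]
    · simp only [h, if_false]
      rw [ih (n / 10) _ (Nat.pos_of_ne_zero h) (by omega)]

lemma toDigits_eq_digits (n : Nat) (h : 0 < n) :
    Nat.toDigits 10 n = ((Nat.digits 10 n).map Nat.digitChar).reverse := by
  rw [Nat.toDigits, toDigitsCore_eq_digits (n + 1) n [] h (by omega), List.append_nil]

lemma toChars_nonneg (n : Nat) : PySem.Int.toChars (n : Int) = Nat.toDigits 10 n := by
  simp [PySem.Int.toChars]

-- ===== VERDICT (by name: the statement is the Claim_ definition above) =====
theorem varchar_length_spec : Claim_equal_varchar_length := by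
  intro num hdom hpre
  obtain ⟨m, rfl⟩ : ∃ m : Nat, num = (m : Int) := ⟨num.toNat, (Int.toNat_of_nonneg hpre).symm⟩
  have hdom' : m ≤ 2147483648 := by
    unfold Dom_varchar_length pvDomInt at hdom
    simp only [decide_eq_true_eq] at hdom
    exact_mod_cast hdom.2
  unfold Spec_varchar_length varchar_length varchar_length_alt
  by_cases hsmall : m < 10
  · interval_cases m <;> decide
  · push_neg at hsmall
    have hm0 : m ≠ 0 := by omega
    set k := Nat.log 10 m with hk
    have hlen : (Nat.digits 10 m).length = k + 1 := Nat.length_digits 10 m (by norm_num) hm0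
    have hlog1 : 1 ≤ k := (Nat.le_log_iff_pow_le (by norm_num) hm0).mpr (by simpa using hsmall)
    have hlog9 : k ≤ 9 := by
      have h10 := (Nat.digits_length_le_iff (by norm_num : (1:Nat) < 10) m).mpr
        (lt_of_le_of_lt hdom' (by norm_num : (2147483648:Nat) < 10 ^ 10))
      omega
    have hDlt : m / 10 ^ k < 10 := by
      rw [Nat.div_lt_iff_lt_mul (by positivity)]
      calc m < 10 ^ (k + 1) := Nat.lt_pow_succ_log_self (by norm_num) m
        _ = 10 * 10 ^ k := by rw [pow_succ']
        _ ≤ 10 * 10 ^ k := le_refl _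
    have hD1 : 1 ≤ m / 10 ^ k :=
      Nat.one_le_div_iff (by positivity) |>.mpr (Nat.pow_log_le_self 10 hm0)
    have hrev : (((Nat.digits 10 m).map Nat.digitChar).reverse).length = k + 1 := by
      simp [hlen]
    have hgetE : ((((Nat.digits 10 m).map Nat.digitChar).reverse))[0]'(by rw [hrev]; omega)
        = Nat.digitChar (m / 10 ^ k) := by
      rw [List.getElem_reverse, List.getElem_map]
      congr 1
      have hgd := Nat.getD_digits m k (b := 10) (by norm_num)
      rw [List.getD_eq_getElem _ _ (by omega), Nat.mod_eq_of_lt hDlt] at hgd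
      simp only [List.length_map, Nat.sub_zero, hlen, Nat.add_sub_cancel]
      exact hgd
    have hget := PySem.List.pyGet?_natCast (((Nat.digits 10 m).map Nat.digitChar).reverse) 0
    rw [List.getElem?_eq_getElem (by rw [hrev]; omega), hgetE] at hget
    push_cast at hget
    rw [toChars_nonneg m, toDigits_eq_digits m (by omega)]
    simp only [hrev, hget, Option.bind_some]
    rw [if_neg (by push_cast; omega), if_neg (by omega)]
    have hk1 : ((((k + 1 : Nat)) : Int) - 1) = ((k : Nat) : Int) := by push_cast; ring
    rw [hk1]
    exact final_parse (m / 10 ^ k) k hD1 hDlt hlog1 hlog9
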